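-- pv_equiv track=rewrite | github.com/Nibe001/RLNMC | metrics/metrics.py | greedy_independent_set_size
-- ===== SOURCE A (Python) =====
-- from typing import Any, Dict, Iterable, List, Mapping, Optional, Sequence, Tuple
--
-- def greedy_independent_set_size(adj: List[List[int]]) -> int:
--     """Greedy maximal independent set size for an undirected graph.
--
--     Parameters
--     ----------
--     adj:
--         Adjacency list (0..n-1). Graph is assumed undirected.
--
--     Returns
--     -------
--     size of a maximal (not maximum) independent set.
--
--     Notes
--     -----
--     This is a standard heuristic: repeatedly pick a node of smallest degree
--     and remove it and its neighbors.
--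
--     It is fast and deterministic (given the same adjacency list).
--     """
--     n = len(adj)
--     remaining = set(range(n))
--     indep = 0
--
--     # Precompute degrees; update lazily.
--     while remaining:
--         # Select node with smallest (current) degree among remaining
--         u = min(remaining, key=lambda i: sum((v in remaining) for v in adj[i]))
--         indep += 1
--         # Remove u and its neighbors
--         to_remove = {u}
--         for v in adj[u]:
--             if v in remaining:
--                 to_remove.add(v)
--         remaining.difference_update(to_remove)
--
--     return indep
-- ===== SOURCE B (Python) =====
-- def greedy_independent_set_size(adj):
--     n = len(adj)
--     remaining = set(range(n))
--     indep = 0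
--     # Incremental degrees: deg[i] = number of occurrences v in adj[i] with v in remaining.
--     deg = [sum(1 for v in adj[i] if 0 <= v < n) for i in range(n)]
--     # Reverse index: rev[v] lists i once per occurrence of v in adj[i] (0 <= v < n).
--     rev = [[] for _ in range(n)]
--     for i in range(n):
--         for v in adj[i]:
--             if 0 <= v < n:
--                 rev[v].append(i)
--     while remaining:
--         u = min(remaining, key=lambda i: deg[i])
--         indep += 1
--         to_remove = {u}
--         for v in adj[u]:
--             if v in remaining:
--                 to_remove.add(v)
--         for x in to_remove:
--             for i in rev[x]:
--                 if i in remaining and i not in to_remove: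
--                     deg[i] -= 1
--         remaining.difference_update(to_remove)
--     return indep
-- ===== Notes on version B (the rewrite author's own statement) =====
-- stated objective: faster
-- what changed: Instead of recomputing every remaining node's degree by rescanning its adjacency row inside each min() call, B precomputes a degree table and a reverse occurrence index and decrements the affected degrees once per removed node, so each round's min() is an O(|remaining|) table lookup scan.
import Mathlib
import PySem

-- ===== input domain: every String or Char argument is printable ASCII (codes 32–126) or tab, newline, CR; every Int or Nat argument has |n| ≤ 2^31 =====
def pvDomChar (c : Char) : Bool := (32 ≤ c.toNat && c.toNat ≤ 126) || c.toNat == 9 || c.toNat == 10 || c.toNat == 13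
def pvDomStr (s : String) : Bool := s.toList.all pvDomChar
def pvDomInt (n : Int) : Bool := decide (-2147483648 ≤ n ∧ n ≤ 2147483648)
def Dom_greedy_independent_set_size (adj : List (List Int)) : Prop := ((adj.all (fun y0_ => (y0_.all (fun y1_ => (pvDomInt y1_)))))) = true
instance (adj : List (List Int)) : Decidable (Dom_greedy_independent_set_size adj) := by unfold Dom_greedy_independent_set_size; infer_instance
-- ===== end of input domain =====

-- B replaces A's per-selection rescan of adjacency rows by incrementally maintained degrees
-- (a degree table plus a reverse occurrence index, decremented on removal); objective: faster.

-- ===== PORT A =====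
-- adj[i]; every index used is in range 0..len(adj)-1, where pyGetD equals Python's adj[i]
def pvRow (adj : List (List Int)) (i : Int) : List Int :=
  PySem.List.pyGetD adj i []

-- sum((v in remaining) for v in adj[i])
def pvKeyA (adj : List (List Int)) (remaining : List Int) (i : Int) : Int :=
  (pvRow adj i).foldl (fun a v => a + (if PySem.Set.contains remaining v then (1:Int) else 0)) 0

-- to_remove = {u}; for v in adj[u]: if v in remaining: to_remove.add(v)   (identical lines in A and B)
def pvToRemove (adj : List (List Int)) (remaining : List Int) (u : Int) : PySem.Set Int :=
  (pvRow adj u).foldl (fun s v => if PySem.Set.contains remaining v then PySem.Set.add s v else s)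
    (PySem.Set.ofList [u])

-- while remaining: … ; each iteration removes at least u from remaining, so fuel = len(adj) suffices
def pvLoopA (adj : List (List Int)) : Nat → List Int → Int → Int
  | 0, _, indep => indep
  | fuel+1, remaining, indep =>
    match PySem.List.min? remaining (fun i => pvKeyA adj remaining i) with
    | none => indep
    | some u =>
      let toRemove := pvToRemove adj remaining u
      pvLoopA adj fuel (remaining.filter (fun x => !(PySem.Set.contains toRemove x))) (indep + 1)

def greedy_independent_set_size (adj : List (List Int)) : Int :=
  pvLoopA adj adj.length (PySem.Set.ofList (PySem.List.pyRange 0 (adj.length : Int) 1)) 0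

-- ===== PORT B =====
-- deg = [sum(1 for v in adj[i] if 0 <= v < n) for i in range(n)]
def pvInitDeg (adj : List (List Int)) : List Int :=
  (PySem.List.pyRange 0 (adj.length : Int) 1).map (fun i =>
    (pvRow adj i).foldl (fun a v => a + (if 0 ≤ v ∧ v < (adj.length : Int) then (1:Int) else 0)) 0)

-- rev = [[] for _ in range(n)]; for i in range(n): for v in adj[i]: if 0 <= v < n: rev[v].append(i)
def pvBuildRev (adj : List (List Int)) : List (List Int) :=
  (PySem.List.pyRange 0 (adj.length : Int) 1).foldl (fun rev i =>
    (pvRow adj i).foldl (fun rev v =>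
      if 0 ≤ v ∧ v < (adj.length : Int) then rev.modify v.toNat (fun l => l ++ [i]) else rev) rev)
    (List.replicate adj.length [])

-- deg[i]; in Source B this index is always a valid non-negative index, where pyGetD equals Python's deg[i]
def pvDegGet (deg : List Int) (i : Int) : Int := PySem.List.pyGetD deg i 0

-- deg[i] -= 1; in Source B i is always a valid non-negative index, where modify is exact
def pvDecAt (deg : List Int) (i : Int) : List Int := deg.modify i.toNat (fun d => d - 1)

def pvLoopB (adj rev : List (List Int)) : Nat → List Int → List Int → Int → Int
  | 0, _, _, indep => indep
  | fuel+1, remaining, deg, indep =>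
    match PySem.List.min? remaining (fun i => pvDegGet deg i) with
    | none => indep
    | some u =>
      let toRemove := pvToRemove adj remaining u
      let deg' := toRemove.foldl (fun d x =>
          (PySem.List.pyGetD rev x []).foldl (fun d i =>
            if PySem.Set.contains remaining i ∧ ¬ PySem.Set.contains toRemove i
            then pvDecAt d i else d) d) deg
      pvLoopB adj rev fuel (remaining.filter (fun x => !(PySem.Set.contains toRemove x))) deg' (indep + 1)

def greedy_independent_set_size_alt (adj : List (List Int)) : Int :=
  pvLoopB adj (pvBuildRev adj) adj.length
    (PySem.Set.ofList (PySem.List.pyRange 0 (adj.length : Int) 1)) (pvInitDeg adj) 0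

-- ===== PRECONDITION & SPEC =====
def Spec_greedy_independent_set_size (adj : List (List Int)) (out : Int) : Prop := out = greedy_independent_set_size_alt adj
instance (adj : List (List Int)) (out : Int) : Decidable (Spec_greedy_independent_set_size adj out) := by unfold Spec_greedy_independent_set_size; infer_instance

-- ===== CLAIM (what is proved, stated in full; the proofs are below) =====
def Claim_equal_greedy_independent_set_size : Prop := ∀ (adj : List (List Int)), Dom_greedy_independent_set_size adj → Spec_greedy_independent_set_size adj (greedy_independent_set_size adj)

-- ===== LEMMAS AND PROOFS =====

-- the indicator-sum loop is a countP
theorem pv_foldl_add_ite (p : Int → Prop) [DecidablePred p] (l : List Int) (a : Int) :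
    l.foldl (fun a v => a + (if p v then (1:Int) else 0)) a
      = a + (l.countP (fun v => decide (p v)) : Int) := by
  induction l generalizing a with
  | nil => simp
  | cons x t ih =>
    simp only [List.foldl_cons, List.countP_cons, ih]
    by_cases h : p x
    · simp [h]
      ring
    · simp [h]

theorem pv_keyA_countP (adj : List (List Int)) (R : List Int) (i : Int) :
    pvKeyA adj R i = ((pvRow adj i).countP (fun v => PySem.Set.contains R v) : Int) := by
  unfold pvKeyA
  rw [pv_foldl_add_ite (fun v => PySem.Set.contains R v = true)]
  simp

theorem pv_mem_toRemove (adj : List (List Int)) (R : List Int) (u x : Int) :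
    x ∈ pvToRemove adj R u ↔ x = u ∨ (x ∈ pvRow adj u ∧ x ∈ R) := by
  unfold pvToRemove
  have aux : ∀ (row : List Int) (s : PySem.Set Int),
      x ∈ row.foldl (fun s v => if PySem.Set.contains R v then PySem.Set.add s v else s) s
        ↔ x ∈ s ∨ (x ∈ row ∧ x ∈ R) := by
    intro row
    induction row with
    | nil => simp
    | cons v t ih =>
      intro s
      simp only [List.foldl_cons]
      by_cases hv : PySem.Set.contains R v
      · rw [if_pos hv, ih, PySem.Set.mem_add]
        have hvR : v ∈ R := (PySem.Set.contains_iff R v).mp hv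
        constructor
        · rintro (⟨h | h⟩ | ⟨h1, h2⟩)
          · exact Or.inl h
          · exact Or.inr ⟨by simp [h], h ▸ hvR⟩
          · exact Or.inr ⟨List.mem_cons_of_mem _ h1, h2⟩
        · rintro (h | ⟨h1, h2⟩)
          · exact Or.inl (Or.inl h)
          · rcases List.mem_cons.mp h1 with h | h
            · exact Or.inl (Or.inr h)
            · exact Or.inr ⟨h, h2⟩
      · rw [if_neg hv, ih]
        have hvR : v ∉ R := fun hm => hv ((PySem.Set.contains_iff R v).mpr hm)
        constructor
        · rintro (h | ⟨h1, h2⟩)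
          · exact Or.inl h
          · exact Or.inr ⟨List.mem_cons_of_mem _ h1, h2⟩
        · rintro (h | ⟨h1, h2⟩)
          · exact Or.inl h
          · rcases List.mem_cons.mp h1 with h | h
            · exact absurd (h ▸ h2) hvR
            · exact Or.inr ⟨h, h2⟩
  rw [aux]
  rw [PySem.Set.mem_ofList]
  simp

theorem pv_nodup_toRemove (adj : List (List Int)) (R : List Int) (u : Int) :
    (pvToRemove adj R u).Nodup := by
  unfold pvToRemove
  have aux : ∀ (row : List Int) (s : PySem.Set Int), s.Nodup →
      (row.foldl (fun s v => if PySem.Set.contains R v then PySem.Set.add s v else s) s).Nodup := by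
    intro row
    induction row with
    | nil => intro s hs; simpa using hs
    | cons v t ih =>
      intro s hs
      simp only [List.foldl_cons]
      by_cases hv : PySem.Set.contains R v
      · rw [if_pos hv]; exact ih _ (PySem.Set.nodup_add s v hs)
      · rw [if_neg hv]; exact ih _ hs
  exact aux _ _ (PySem.Set.nodup_ofList [u])

theorem pv_mem_filt (R : List Int) (T : PySem.Set Int) (x : Int) :
    x ∈ R.filter (fun y => !(PySem.Set.contains T y)) ↔ x ∈ R ∧ x ∉ T := by
  simp [List.mem_filter]

-- countP of "in l₁ but not in l₂" plus countP of "in l₂" is countP of "in l₁", when l₂ ⊆ l₁ pointwise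
theorem pv_countP_sub (l : List Int) (p q : Int → Bool) (h : ∀ v, q v = true → p v = true) :
    l.countP (fun v => p v && !q v) + l.countP q = l.countP p := by
  induction l with
  | nil => simp
  | cons x t ih =>
    simp only [List.countP_cons]
    by_cases hq : q x = true
    · have hp := h x hq
      simp only [hq, hp]
      simp
      omega
    · by_cases hp : p x = true <;> simp only [hq, hp] <;> simp <;> omega

theorem pv_keyA_filter (adj : List (List Int)) (R : List Int) (T : PySem.Set Int) (j : Int)
    (hT : ∀ x ∈ T, x ∈ R) :
    pvKeyA adj (R.filter (fun y => !(PySem.Set.contains T y))) j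
      = pvKeyA adj R j - ((pvRow adj j).countP (fun v => decide (v ∈ T)) : Int) := by
  rw [pv_keyA_countP, pv_keyA_countP]
  have hcong : (pvRow adj j).countP (fun v => PySem.Set.contains (R.filter (fun y => !(PySem.Set.contains T y))) v)
      = (pvRow adj j).countP (fun v => PySem.Set.contains R v && !(decide (v ∈ T))) := by
    apply List.countP_congr
    intro v _
    by_cases hR : v ∈ R <;> by_cases hTv : v ∈ T <;>
      simp [List.mem_filter, hR, hTv]
  have hsub := pv_countP_sub (pvRow adj j) (fun v => PySem.Set.contains R v)
      (fun v => decide (v ∈ T)) (by intro v hv; simp at hv; simp [hT v hv])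
  rw [hcong]
  simp only [] at hsub
  omega

-- pointwise effect of the decrement loop, for a static condition P
theorem pv_dec_fold_len (P : Int → Prop) [DecidablePred P] (L : List Int) :
    ∀ (deg : List Int),
      (L.foldl (fun d i => if P i then pvDecAt d i else d) deg).length = deg.length := by
  induction L with
  | nil => intro deg; rfl
  | cons i t ih =>
    intro deg
    simp only [List.foldl_cons]
    by_cases h : P i
    · rw [if_pos h, ih]; simp [pvDecAt]
    · rw [if_neg h, ih]

theorem pv_degGet_eq (deg : List Int) (j : Int) (h0 : 0 ≤ j) (h1 : j < (deg.length : Int)) :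
    pvDegGet deg j = deg[j.toNat]'(by omega) := by
  unfold pvDegGet
  rw [PySem.List.pyGetD_eq_getElem deg 0 h0 h1]

theorem pv_dec_fold_get (P : Int → Prop) [DecidablePred P] (L : List Int) :
    ∀ (deg : List Int) (j : Int), (∀ i ∈ L, 0 ≤ i) → 0 ≤ j → j < (deg.length : Int) →
      pvDegGet (L.foldl (fun d i => if P i then pvDecAt d i else d) deg) j
        = pvDegGet deg j - (if P j then ((L.count j : Nat) : Int) else 0) := by
  induction L with
  | nil => intro deg j _ _ _; simp
  | cons i t ih =>
    intro deg j hnn h0 h1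
    have hi0 : 0 ≤ i := hnn i (List.mem_cons_self ..)
    simp only [List.foldl_cons]
    by_cases hPi : P i
    · rw [if_pos hPi]
      have hlen : (pvDecAt deg i).length = deg.length := by simp [pvDecAt]
      rw [ih (pvDecAt deg i) j (fun x hx => hnn x (List.mem_cons_of_mem _ hx)) h0 (by rw [hlen]; exact h1)]
      by_cases hij : i = j
      · subst hij
        have hget : pvDegGet (pvDecAt deg i) i = pvDegGet deg i - 1 := by
          rw [pv_degGet_eq _ _ hi0 (by rw [hlen]; exact h1), pv_degGet_eq _ _ hi0 h1]
          simp [pvDecAt]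
        rw [hget, if_pos hPi, if_pos hPi, List.count_cons_self]
        push_cast
        ring
      · have hget : pvDegGet (pvDecAt deg i) j = pvDegGet deg j := by
          rw [pv_degGet_eq _ _ h0 (by rw [hlen]; exact h1), pv_degGet_eq _ _ h0 h1]
          have : i.toNat ≠ j.toNat := by omega
          simp [pvDecAt, this]
        rw [hget, List.count_cons_of_ne (by simpa using hij)]
    · rw [if_neg hPi]
      rw [ih deg j (fun x hx => hnn x (List.mem_cons_of_mem _ hx)) h0 h1]
      by_cases hij : i = j
      · subst hij
        rw [if_neg hPi, if_neg hPi]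
      · rw [List.count_cons_of_ne (by simpa using hij)]

-- the reverse-index builder, slot by slot
theorem pv_inner_len (n i : Int) (row : List Int) :
    ∀ (rev : List (List Int)),
      (row.foldl (fun rev v => if 0 ≤ v ∧ v < n then rev.modify v.toNat (fun l => l ++ [i]) else rev) rev).length
        = rev.length := by
  induction row with
  | nil => intro rev; rfl
  | cons v t ih =>
    intro rev
    simp only [List.foldl_cons]
    by_cases h : 0 ≤ v ∧ v < n
    · rw [if_pos h, ih]; simp
    · rw [if_neg h, ih]

theorem pv_inner_slot (n i x : Int) (hx0 : 0 ≤ x) (hxn : x < n) (row : List Int) :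
    ∀ (rev : List (List Int)), x.toNat < rev.length →
      PySem.List.pyGetD (row.foldl (fun rev v => if 0 ≤ v ∧ v < n then rev.modify v.toNat (fun l => l ++ [i]) else rev) rev) x []
        = PySem.List.pyGetD rev x [] ++ List.replicate (row.count x) i := by
  induction row with
  | nil => intro rev _; simp
  | cons v t ih =>
    intro rev hlt
    simp only [List.foldl_cons]
    by_cases h : 0 ≤ v ∧ v < n
    · rw [if_pos h]
      have hlen : (rev.modify v.toNat (fun l => l ++ [i])).length = rev.length := by simp
      rw [ih _ (by rw [hlen]; exact hlt)]
      by_cases hvx : v = x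
      · subst hvx
        have hget : PySem.List.pyGetD (rev.modify v.toNat (fun l => l ++ [i])) v []
            = PySem.List.pyGetD rev v [] ++ [i] := by
          rw [PySem.List.pyGetD_eq_getElem _ _ hx0 (by rw [hlen]; omega),
              PySem.List.pyGetD_eq_getElem _ _ hx0 (by omega)]
          simp
        rw [hget, List.count_cons_self, List.replicate_succ, List.append_assoc]
        rfl
      · have hget : PySem.List.pyGetD (rev.modify v.toNat (fun l => l ++ [i])) x []
            = PySem.List.pyGetD rev x [] := by
          rw [PySem.List.pyGetD_eq_getElem _ _ hx0 (by rw [hlen]; omega),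
              PySem.List.pyGetD_eq_getElem _ _ hx0 (by omega)]
          have : v.toNat ≠ x.toNat := by omega
          simp [this]
        rw [hget, List.count_cons_of_ne (by simpa using hvx)]
    · rw [if_neg h]
      have hvx : v ≠ x := by rintro rfl; exact h ⟨hx0, hxn⟩
      rw [ih _ hlt, List.count_cons_of_ne (by simpa using hvx)]

theorem pv_outer_len (adj : List (List Int)) (l : List Int) :
    ∀ (rev : List (List Int)),
      (l.foldl (fun rev i =>
        (pvRow adj i).foldl (fun rev v =>
          if 0 ≤ v ∧ v < (adj.length : Int) then rev.modify v.toNat (fun l => l ++ [i]) else rev) rev) rev).length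
        = rev.length := by
  induction l with
  | nil => intro rev; rfl
  | cons i t ih =>
    intro rev
    simp only [List.foldl_cons]
    rw [ih, pv_inner_len]

theorem pv_build_slot (adj : List (List Int)) (x : Int) (hx0 : 0 ≤ x) (hxn : x < (adj.length : Int)) :
    PySem.List.pyGetD (pvBuildRev adj) x []
      = (PySem.List.pyRange 0 (adj.length : Int) 1).flatMap
          (fun i => List.replicate ((pvRow adj i).count x) i) := by
  have main : ∀ (k : Nat), (k : Int) ≤ (adj.length : Int) →
      PySem.List.pyGetD ((PySem.List.pyRange 0 (k : Int) 1).foldl (fun rev i =>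
        (pvRow adj i).foldl (fun rev v =>
          if 0 ≤ v ∧ v < (adj.length : Int) then rev.modify v.toNat (fun l => l ++ [i]) else rev) rev)
        (List.replicate adj.length [])) x []
        = (PySem.List.pyRange 0 (k : Int) 1).flatMap (fun i => List.replicate ((pvRow adj i).count x) i) := by
    intro k
    induction k with
    | zero =>
      intro _
      rw [PySem.List.pyRange_one_eq_nil (by norm_num)]
      simp only [List.foldl_nil, List.flatMap_nil]
      rw [PySem.List.pyGetD_eq_getElem _ _ hx0 (by simpa using hxn)]
      simp
    | succ m ih =>
      intro hk
      have hm : (m : Int) ≤ (adj.length : Int) := by push_cast at hk ⊢; omega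
      have hsplit : PySem.List.pyRange 0 ((m + 1 : Nat) : Int) 1
          = PySem.List.pyRange 0 (m : Int) 1 ++ [(m : Int)] := by
        have h0m : (0 : Int) ≤ (m : Int) := by omega
        have := PySem.List.pyRange_one_succ_right (a := 0) (b := (m : Int)) h0m
        push_cast
        push_cast at this
        exact this
      rw [hsplit, List.foldl_append, List.flatMap_append]
      simp only [List.foldl_cons, List.foldl_nil, List.flatMap_cons, List.flatMap_nil, List.append_nil]
      rw [pv_inner_slot (adj.length : Int) (m : Int) x hx0 hxn _ _
            (by rw [pv_outer_len]; simp; omega),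
          ih hm]
  have := main adj.length (le_refl _)
  unfold pvBuildRev
  exact this

-- every entry of a reverse-index slot is a non-negative row index
theorem pv_mem_slot_nonneg (adj : List (List Int)) (x i : Int) (hx0 : 0 ≤ x) (hxn : x < (adj.length : Int))
    (h : i ∈ PySem.List.pyGetD (pvBuildRev adj) x []) : 0 ≤ i := by
  rw [pv_build_slot adj x hx0 hxn] at h
  rw [List.mem_flatMap] at h
  obtain ⟨a, ha, hia⟩ := h
  rw [List.eq_of_mem_replicate hia]
  exact (PySem.List.mem_pyRange_one.mp ha).1

theorem pv_count_fmr (l : List Int) (c : Int → Nat) (j : Int) (h : l.Nodup) :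
    (l.flatMap (fun i => List.replicate (c i) i)).count j = if j ∈ l then c j else 0 := by
  induction l with
  | nil => simp
  | cons i t ih =>
    have hnd := (List.nodup_cons.mp h)
    simp only [List.flatMap_cons, List.count_append, ih hnd.2]
    by_cases hij : j = i
    · subst hij
      rw [List.count_replicate]
      simp [hnd.1]
    · rw [List.count_replicate]
      simp only [beq_iff_eq]
      rw [if_neg (fun hh => hij hh.symm)]
      simp [List.mem_cons, hij]

theorem pv_countP_cons_mem (ys : List Int) (x : Int) (T : List Int) (hx : x ∉ T) :
    ys.countP (fun v => decide (v ∈ x :: T)) = ys.count x + ys.countP (fun v => decide (v ∈ T)) := by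
  induction ys with
  | nil => simp
  | cons y t ih =>
    simp only [List.countP_cons, List.count_cons, ih]
    by_cases hyx : y = x
    · subst hyx
      simp [List.mem_cons, hx]
      omega
    · by_cases hyT : y ∈ T
      · simp [List.mem_cons, hyx, hyT]
        omega
      · simp [List.mem_cons, hyx, hyT]

-- total decrements hitting j across removed vertices = occurrences of removed vertices in adj[j]
theorem pv_count_flat (adj : List (List Int)) (j : Int) (hj0 : 0 ≤ j) (hjn : j < (adj.length : Int)) :
    ∀ (T : List Int), T.Nodup → (∀ x ∈ T, 0 ≤ x ∧ x < (adj.length : Int)) →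
      (T.flatMap (fun x => PySem.List.pyGetD (pvBuildRev adj) x [])).count j
        = (pvRow adj j).countP (fun v => decide (v ∈ T)) := by
  intro T
  induction T with
  | nil => intro _ _; simp
  | cons x t ih =>
    intro hnd hbd
    have hx := hbd x (List.mem_cons_self ..)
    simp only [List.flatMap_cons, List.count_append]
    rw [ih (List.nodup_cons.mp hnd).2 (fun y hy => hbd y (List.mem_cons_of_mem _ hy))]
    rw [pv_build_slot adj x hx.1 hx.2]
    rw [pv_count_fmr _ _ _ (PySem.List.nodup_pyRange_one 0 _)]
    rw [if_pos (PySem.List.mem_pyRange_one.mpr ⟨hj0, hjn⟩)]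
    rw [pv_countP_cons_mem (pvRow adj j) x t (List.nodup_cons.mp hnd).1]

-- Python's min(xs, key=…) depends only on the key values of the members
theorem pv_min?_congr (xs : List Int) (f g : Int → Int) (h : ∀ i ∈ xs, f i = g i) :
    PySem.List.min? xs f = PySem.List.min? xs g := by
  have aux : ∀ (l : List Int) (acc : Option Int), (∀ i ∈ l, f i = g i) → (∀ m, acc = some m → f m = g m) →
      l.foldl (fun acc x => match acc with
        | none => some x
        | some m => if f x < f m then some x else some m) acc
      = l.foldl (fun acc x => match acc with
        | none => some x
        | some m => if g x < g m then some x else some m) acc := by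
    intro l
    induction l with
    | nil => intro acc _ _; rfl
    | cons x t ih =>
      intro acc hl hacc
      simp only [List.foldl_cons]
      have hx := hl x (List.mem_cons_self ..)
      have ht : ∀ i ∈ t, f i = g i := fun i hi => hl i (List.mem_cons_of_mem _ hi)
      cases acc with
      | none =>
        exact ih (some x) ht (by intro m' hm'; cases hm'; exact hx)
      | some m =>
        have hm := hacc m rfl
        show List.foldl (fun acc x => match acc with
            | none => some x
            | some m => if f x < f m then some x else some m)
            (if f x < f m then some x else some m) t
          = List.foldl (fun acc x => match acc with
            | none => some x
            | some m => if g x < g m then some x else some m)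
            (if g x < g m then some x else some m) t
        rw [hx, hm]
        split_ifs with hlt
        · exact ih (some x) ht (by intro m' hm'; cases hm'; exact hx)
        · exact ih (some m) ht (by intro m' hm'; cases hm'; exact hm)
  have hf : PySem.List.min? xs f = List.foldl (fun acc x => match acc with
      | none => some x
      | some m => if f x < f m then some x else some m) none xs := by
    unfold PySem.List.min?
    congr 1
    funext acc y
    cases acc <;> rfl
  have hg : PySem.List.min? xs g = List.foldl (fun acc x => match acc with
      | none => some x
      | some m => if g x < g m then some x else some m) none xs := by
    unfold PySem.List.min?
    congr 1
    funext acc y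
    cases acc <;> rfl
  rw [hf, hg]
  exact aux xs none h (by intro m hm; cases hm)

-- main loop equivalence, by induction on the (shared) fuel
theorem pv_loop_eq (adj : List (List Int)) :
    ∀ (fuel : Nat) (remaining deg : List Int) (indep : Int),
      (∀ i ∈ remaining, 0 ≤ i ∧ i < (adj.length : Int)) →
      deg.length = adj.length →
      (∀ i ∈ remaining, pvDegGet deg i = pvKeyA adj remaining i) →
      pvLoopA adj fuel remaining indep = pvLoopB adj (pvBuildRev adj) fuel remaining deg indep := by
  intro fuel
  induction fuel with
  | zero => intro remaining deg indep _ _ _; rfl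
  | succ fuel ih =>
    intro remaining deg indep hb hlen hkey
    unfold pvLoopA pvLoopB
    rw [pv_min?_congr remaining (fun i => pvKeyA adj remaining i) (fun i => pvDegGet deg i)
          (fun i hi => (hkey i hi).symm)]
    cases hmin : PySem.List.min? remaining (fun i => pvDegGet deg i) with
    | none => rfl
    | some u =>
      simp only []
      have hu : u ∈ remaining := PySem.List.min?_mem hmin
      have hTsub : ∀ x ∈ pvToRemove adj remaining u, x ∈ remaining := by
        intro x hx
        rcases (pv_mem_toRemove adj remaining u x).mp hx with rfl | ⟨_, h2⟩
        · exact hu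
        · exact h2
      have hTbd : ∀ x ∈ pvToRemove adj remaining u, 0 ≤ x ∧ x < (adj.length : Int) :=
        fun x hx => hb x (hTsub x hx)
      have hLnn : ∀ i ∈ (pvToRemove adj remaining u).flatMap
          (fun x => PySem.List.pyGetD (pvBuildRev adj) x []), 0 ≤ i := by
        intro i hi
        rw [List.mem_flatMap] at hi
        obtain ⟨x, hxT, hix⟩ := hi
        exact pv_mem_slot_nonneg adj x i (hTbd x hxT).1 (hTbd x hxT).2 hix
      have hb' : ∀ i ∈ remaining.filter
          (fun x => !(PySem.Set.contains (pvToRemove adj remaining u) x)),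
          0 ≤ i ∧ i < (adj.length : Int) := by
        intro i hi
        exact hb i ((pv_mem_filt remaining _ i).mp hi).1
      have hlen' : ((pvToRemove adj remaining u).foldl (fun d x =>
          (PySem.List.pyGetD (pvBuildRev adj) x []).foldl (fun d i =>
            if PySem.Set.contains remaining i ∧ ¬ PySem.Set.contains (pvToRemove adj remaining u) i
            then pvDecAt d i else d) d) deg).length = adj.length := by
        rw [← List.foldl_flatMap, pv_dec_fold_len, hlen]
      have hkey' : ∀ j ∈ remaining.filter
          (fun x => !(PySem.Set.contains (pvToRemove adj remaining u) x)),
          pvDegGet ((pvToRemove adj remaining u).foldl (fun d x =>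
            (PySem.List.pyGetD (pvBuildRev adj) x []).foldl (fun d i =>
              if PySem.Set.contains remaining i ∧ ¬ PySem.Set.contains (pvToRemove adj remaining u) i
              then pvDecAt d i else d) d) deg) j
            = pvKeyA adj (remaining.filter
                (fun x => !(PySem.Set.contains (pvToRemove adj remaining u) x))) j := by
        intro j hj
        obtain ⟨hjR, hjT⟩ := (pv_mem_filt remaining _ j).mp hj
        have hjb := hb j hjR
        have hPj : PySem.Set.contains remaining j = true ∧
            ¬ PySem.Set.contains (pvToRemove adj remaining u) j = true :=
          ⟨(PySem.Set.contains_iff remaining j).mpr hjR,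
           fun hc => hjT ((PySem.Set.contains_iff _ j).mp hc)⟩
        rw [← List.foldl_flatMap]
        rw [pv_dec_fold_get _ _ deg j hLnn hjb.1 (by rw [hlen]; exact hjb.2)]
        rw [if_pos hPj]
        rw [pv_count_flat adj j hjb.1 hjb.2 _ (pv_nodup_toRemove adj remaining u) hTbd]
        rw [hkey j hjR]
        rw [pv_keyA_filter adj remaining (pvToRemove adj remaining u) j hTsub]
      exact ih _ _ (indep + 1) hb' hlen' hkey'

-- ===== VERDICT (by name: the statement is the Claim_ definition above) =====
theorem greedy_independent_set_size_spec : Claim_equal_greedy_independent_set_size := by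
  intro adj _
  unfold Spec_greedy_independent_set_size greedy_independent_set_size greedy_independent_set_size_alt
  apply pv_loop_eq
  · intro i hi
    rw [PySem.Set.mem_ofList] at hi
    exact PySem.List.mem_pyRange_one.mp hi
  · unfold pvInitDeg
    rw [List.length_map, PySem.List.length_pyRange_one]
    omega
  · intro i hi
    rw [PySem.Set.mem_ofList] at hi
    obtain ⟨hi0, hin⟩ := PySem.List.mem_pyRange_one.mp hi
    unfold pvDegGet pvInitDeg
    have hk : i = ((i.toNat : Nat) : Int) := by omega
    rw [hk] at hin ⊢
    rw [PySem.List.pyGetD_map_pyRange _ adj.length i.toNat 0 (by exact_mod_cast hin)]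
    rw [pv_foldl_add_ite (fun v => 0 ≤ v ∧ v < (adj.length : Int))]
    rw [pv_keyA_countP]
    have : (pvRow adj ((i.toNat : Nat) : Int)).countP (fun v => decide (0 ≤ v ∧ v < (adj.length : Int)))
        = (pvRow adj ((i.toNat : Nat) : Int)).countP
            (fun v => PySem.Set.contains (PySem.Set.ofList (PySem.List.pyRange 0 (adj.length : Int) 1)) v) := by
      apply List.countP_congr
      intro v _
      by_cases hv : 0 ≤ v ∧ v < (adj.length : Int) <;>
        simp [PySem.Set.mem_ofList, PySem.List.mem_pyRange_one, hv]
    rw [this]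
    simp
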